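-- pv_equiv track=rewrite | github.com/eliottcassidy2000/math | 04-computation/q009_n8_deltaI.py | count_vd_pairs_by_type
-- ===== SOURCE A (Python) =====
-- def count_vd_pairs_by_type(cycles):
--     from collections import Counter
--     nc = len(cycles)
--     vertex_sets = [frozenset(c) for c in cycles]
--     type_counts = Counter()
--     for a in range(nc):
--         for b in range(a + 1, nc):
--             if not (vertex_sets[a] & vertex_sets[b]):
--                 la, lb = len(cycles[a]), len(cycles[b])
--                 key = tuple(sorted([la, lb]))
--                 type_counts[key] += 1
--     return type_counts
-- ===== SOURCE B (Python) =====
-- def count_vd_pairs_by_type(cycles):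
--     from collections import Counter
--     nc = len(cycles)
--     # vertex -> sorted list of cycle indices containing it; collect colliding pairs once
--     v2c = {}
--     inter = set()
--     for i, c in enumerate(cycles):
--         for v in c:
--             lst = v2c.setdefault(v, [])
--             if lst and lst[-1] == i:
--                 continue  # v already seen in this cycle
--             for j in lst:
--                 inter.add((j, i))
--             lst.append(i)
--     lens = [len(c) for c in cycles]
--     type_counts = Counter()
--     for a in range(nc):
--         for b in range(a + 1, nc):
--             if (a, b) not in inter:
--                 la, lb = lens[a], lens[b]
--                 type_counts[(la, lb) if la <= lb else (lb, la)] += 1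
--     return type_counts
-- ===== Notes on version B (the rewrite author's own statement) =====
-- stated objective: faster
-- what changed: Instead of computing a frozenset intersection for every cycle pair, B builds a vertex-to-cycle-indices incidence map in one pass, collects the set of vertex-sharing (intersecting) index pairs from it, and tallies pair types with a constant-time set-membership test per pair.
import Mathlib
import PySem

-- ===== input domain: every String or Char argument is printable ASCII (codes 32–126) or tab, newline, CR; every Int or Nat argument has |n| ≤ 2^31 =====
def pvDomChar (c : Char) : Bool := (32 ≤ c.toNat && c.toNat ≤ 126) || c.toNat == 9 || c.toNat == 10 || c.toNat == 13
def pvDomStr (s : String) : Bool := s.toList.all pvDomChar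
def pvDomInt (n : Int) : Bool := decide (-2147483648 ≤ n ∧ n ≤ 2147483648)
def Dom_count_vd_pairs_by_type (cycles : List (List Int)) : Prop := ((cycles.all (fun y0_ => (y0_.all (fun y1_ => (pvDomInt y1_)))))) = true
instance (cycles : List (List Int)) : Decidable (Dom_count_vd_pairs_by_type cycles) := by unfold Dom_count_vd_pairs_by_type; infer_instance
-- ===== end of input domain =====

-- B replaces the per-pair frozenset intersection by a vertex→cycle-indices incidence map and a
-- precomputed set of intersecting index pairs (constant-factor speedup measured by the timing
-- run); same exact Counter, insertion order included.

-- ===== PORT A =====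
def count_vd_pairs_by_type (cycles : List (List Int)) : List (Int × Int × Int) :=
  let nc : Int := cycles.length
  let vertex_sets : List (PySem.Set Int) := cycles.map (fun c => PySem.Set.ofList c)
  let type_counts : PySem.Dict (Int × Int) Int :=
    (PySem.List.pyRange 0 nc 1).foldl (fun d a =>
      (PySem.List.pyRange (a + 1) nc 1).foldl (fun d b =>
        if PySem.Set.inter (PySem.List.pyGetD vertex_sets a []) (PySem.List.pyGetD vertex_sets b []) = [] then
          let la : Int := (PySem.List.pyGetD cycles a []).length
          let lb : Int := (PySem.List.pyGetD cycles b []).length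
          -- tuple(sorted([la, lb])) of a two-element list
          let key : Int × Int := if la ≤ lb then (la, lb) else (lb, la)
          d.modify key 0 (· + 1)
        else d) d) PySem.Dict.empty
  type_counts.items.map (fun p => (p.1.1, p.1.2, p.2))

-- ===== PORT B =====
-- one inner step of the incidence pass: process vertex v of cycle index i
def pvStepV (i : Int) (st : PySem.Dict Int (List Int) × PySem.Set (Int × Int)) (v : Int) :
    PySem.Dict Int (List Int) × PySem.Set (Int × Int) :=
  let lst := st.1.getD v []
  if lst.getLast? = some i then st   -- 'if lst and lst[-1] == i: continue'
  else (st.1.insert v (lst ++ [i]), lst.foldl (fun s j => PySem.Set.add s (j, i)) st.2)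

def count_vd_pairs_by_type_alt (cycles : List (List Int)) : List (Int × Int × Int) :=
  let nc : Int := cycles.length
  let st := (PySem.List.enumerate cycles 0).foldl
      (fun st ic => ic.2.foldl (pvStepV ic.1) st)
      ((PySem.Dict.empty : PySem.Dict Int (List Int)), (PySem.Set.empty : PySem.Set (Int × Int)))
  let inter := st.2
  let lens : List Int := cycles.map (fun c => (c.length : Int))
  let type_counts : PySem.Dict (Int × Int) Int :=
    (PySem.List.pyRange 0 nc 1).foldl (fun d a =>
      (PySem.List.pyRange (a + 1) nc 1).foldl (fun d b =>
        if (a, b) ∈ inter then d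
        else
          let la : Int := PySem.List.pyGetD lens a 0
          let lb : Int := PySem.List.pyGetD lens b 0
          let key : Int × Int := if la ≤ lb then (la, lb) else (lb, la)
          d.modify key 0 (· + 1)) d) PySem.Dict.empty
  type_counts.items.map (fun p => (p.1.1, p.1.2, p.2))

-- ===== PRECONDITION & SPEC =====
def Spec_count_vd_pairs_by_type (cycles : List (List Int)) (out : List (Int × Int × Int)) : Prop := out = count_vd_pairs_by_type_alt cycles
instance (cycles : List (List Int)) (out : List (Int × Int × Int)) : Decidable (Spec_count_vd_pairs_by_type cycles out) := by unfold Spec_count_vd_pairs_by_type; infer_instance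

-- ===== CLAIM (what is proved, stated in full; the proofs are below) =====
def Claim_equal_count_vd_pairs_by_type : Prop := ∀ (cycles : List (List Int)), Dom_count_vd_pairs_by_type cycles → Spec_count_vd_pairs_by_type cycles (count_vd_pairs_by_type cycles)


-- ===== LEMMAS AND PROOFS =====

-- "j recorded for vertex v" after the first i cycles: j is the index of an earlier cycle containing v
def pvBrel (cycles : List (List Int)) (i : Int) (v j : Int) : Prop :=
  ∃ k : Nat, k < cycles.length ∧ (k : Int) < i ∧ j = (k : Int) ∧ v ∈ cycles.getD k []

-- "intersecting pair recorded" after the first i cycles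
def pvRrel (cycles : List (List Int)) (i : Int) (p : Int × Int) : Prop :=
  ∃ (v : Int) (a b : Nat), a < b ∧ b < cycles.length ∧ (b : Int) < i ∧
    p = ((a : Int), (b : Int)) ∧ v ∈ cycles.getD a [] ∧ v ∈ cycles.getD b []

-- loop invariant for the incidence pass, parametric in the already-established relations
def pvInv (i : Int) (B : Int → Int → Prop) (R : Int × Int → Prop) (seen : List Int)
    (st : PySem.Dict Int (List Int) × PySem.Set (Int × Int)) : Prop :=
  (∀ v j, j ∈ st.1.getD v [] ↔ B v j ∨ (j = i ∧ v ∈ seen)) ∧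
  (∀ v j, j ∈ st.1.getD v [] → j ≤ i) ∧
  (∀ v, v ∈ seen → (st.1.getD v []).getLast? = some i) ∧
  (∀ p, p ∈ st.2 ↔ R p ∨ ∃ v ∈ seen, B v p.1 ∧ p.2 = i)

theorem pvStepV_inv {i : Int} {B : Int → Int → Prop} {R : Int × Int → Prop}
    {seen : List Int} {st : PySem.Dict Int (List Int) × PySem.Set (Int × Int)} (v : Int)
    (hB : ∀ v j, B v j → j < i) (h : pvInv i B R seen st) :
    pvInv i B R (seen ++ [v]) (pvStepV i st v) := by
  obtain ⟨h1, h2, h3, h4⟩ := h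
  unfold pvStepV
  by_cases hg : (st.1.getD v []).getLast? = some i
  · -- guard fires: v was already seen in this cycle
    have hvseen : v ∈ seen := by
      have hi : i ∈ st.1.getD v [] := List.mem_of_getLast? hg
      rcases (h1 v i).1 hi with hb | ⟨_, hs⟩
      · exact absurd (hB v i hb) (lt_irrefl i)
      · exact hs
    rw [if_pos hg]
    refine ⟨fun v' j => ?_, h2, fun v' hv' => ?_, fun p => ?_⟩
    · rw [h1 v' j]; simp only [List.mem_append, List.mem_singleton]
      constructor
      · rintro (hb | ⟨hj, hs⟩)
        exacts [Or.inl hb, Or.inr ⟨hj, Or.inl hs⟩]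
      · rintro (hb | ⟨hj, hs | hveq⟩)
        exacts [Or.inl hb, Or.inr ⟨hj, hs⟩, Or.inr ⟨hj, by rw [hveq]; exact hvseen⟩]
    · rcases List.mem_append.1 hv' with hs | hs
      · exact h3 v' hs
      · rw [List.mem_singleton] at hs; subst hs; exact hg
    · rw [h4 p]; simp only [List.mem_append, List.mem_singleton]
      constructor
      · rintro (hr | ⟨v', hs, hb⟩)
        exacts [Or.inl hr, Or.inr ⟨v', Or.inl hs, hb⟩]
      · rintro (hr | ⟨v', hs | hveq, hb⟩)
        exacts [Or.inl hr, Or.inr ⟨v', hs, hb⟩, Or.inr ⟨v', by rw [hveq]; exact hvseen, hb⟩]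
  · -- guard does not fire: v is new in this cycle
    have hvns : v ∉ seen := fun hs => hg (h3 v hs)
    rw [if_neg hg]
    refine ⟨fun v' j => ?_, fun v' j hj => ?_, fun v' hv' => ?_, fun p => ?_⟩
    · by_cases hv : v' = v
      · subst hv
        rw [PySem.Dict.getD_insert, if_pos rfl]
        simp only [List.mem_append, List.mem_singleton]
        constructor
        · rintro (hL | hji)
          · rcases (h1 v' j).1 hL with hb | ⟨hj, hs⟩
            exacts [Or.inl hb, absurd hs hvns]
          · exact Or.inr ⟨hji, Or.inr trivial⟩
        · rintro (hb | ⟨hji, _⟩)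
          · exact Or.inl ((h1 v' j).2 (Or.inl hb))
          · exact Or.inr hji
      · rw [PySem.Dict.getD_insert, if_neg hv, h1 v' j]
        simp only [List.mem_append, List.mem_singleton]
        constructor
        · rintro (hb | ⟨hj, hs⟩)
          exacts [Or.inl hb, Or.inr ⟨hj, Or.inl hs⟩]
        · rintro (hb | ⟨hj, hs | hveq⟩)
          exacts [Or.inl hb, Or.inr ⟨hj, hs⟩, absurd hveq hv]
    · by_cases hv : v' = v
      · subst hv
        rw [PySem.Dict.getD_insert, if_pos rfl] at hj
        rcases List.mem_append.1 hj with hj | hj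
        · exact h2 v' j hj
        · rw [List.mem_singleton] at hj; omega
      · rw [PySem.Dict.getD_insert, if_neg hv] at hj
        exact h2 v' j hj
    · rcases List.mem_append.1 hv' with hs | hs
      · rw [PySem.Dict.getD_insert, if_neg (by rintro rfl; exact hvns hs)]
        exact h3 v' hs
      · rw [List.mem_singleton] at hs; subst hs
        rw [PySem.Dict.getD_insert, if_pos rfl]
        exact List.getLast?_concat
    · obtain ⟨p1, p2⟩ := p
      rw [PySem.Set.mem_foldl_add, h4 (p1, p2)]
      simp only [List.mem_append, List.mem_singleton]
      constructor
      · rintro ((hr | ⟨v', hs, hb⟩) | ⟨j, hj, hp⟩)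
        · exact Or.inl hr
        · exact Or.inr ⟨v', Or.inl hs, hb⟩
        · obtain ⟨hp1, hp2⟩ := Prod.mk.injEq .. ▸ hp
          rcases (h1 v j).1 hj with hb | ⟨_, hs⟩
          · exact Or.inr ⟨v, Or.inr rfl, by rw [hp1]; exact hb, hp2⟩
          · exact absurd hs hvns
      · rintro (hr | ⟨v', hs | hveq, hb, hp2⟩)
        · exact Or.inl (Or.inl hr)
        · exact Or.inl (Or.inr ⟨v', hs, hb, hp2⟩)
        · refine Or.inr ⟨p1, (h1 v p1).2 (Or.inl (by rw [← hveq]; exact hb)), ?_⟩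
          rw [hp2]

theorem pvFoldC_inv {i : Int} {B : Int → Int → Prop} {R : Int × Int → Prop}
    (c : List Int) (hB : ∀ v j, B v j → j < i) :
    ∀ (seen : List Int) (st : PySem.Dict Int (List Int) × PySem.Set (Int × Int)),
    pvInv i B R seen st → pvInv i B R (seen ++ c) (c.foldl (pvStepV i) st) := by
  induction c with
  | nil => intro seen st h; simpa using h
  | cons v c ih =>
    intro seen st h
    have h' := pvStepV_inv v hB h
    have := ih (seen ++ [v]) (pvStepV i st v) h'
    simpa [List.append_assoc] using this

theorem pvOuter_inv (cycles : List (List Int)) :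
    ∀ (suffix : List (List Int)) (i : Nat)
      (st : PySem.Dict Int (List Int) × PySem.Set (Int × Int)),
      suffix = cycles.drop i → i ≤ cycles.length →
      pvInv (i : Int) (pvBrel cycles i) (pvRrel cycles i) [] st →
      pvInv (cycles.length : Int) (pvBrel cycles cycles.length) (pvRrel cycles cycles.length) []
        ((PySem.List.enumerate suffix (i : Int)).foldl (fun st ic => ic.2.foldl (pvStepV ic.1) st) st) := by
  intro suffix
  induction suffix with
  | nil =>
    intro i st hdrop hle h
    have : cycles.length ≤ i := by
      have := congrArg List.length hdrop
      simp only [List.length_nil, List.length_drop] at this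
      omega
    have hi : i = cycles.length := le_antisymm hle this
    subst hi
    simpa [PySem.List.enumerate] using h
  | cons c rest ih =>
    intro i st hdrop hle h
    have hilt : i < cycles.length := by
      by_contra hge
      rw [not_lt] at hge
      rw [List.drop_eq_nil_of_le hge] at hdrop
      exact List.cons_ne_nil c rest hdrop
    have hd := List.drop_eq_getElem_cons hilt (l := cycles)
    rw [← hdrop] at hd
    obtain ⟨hc, hrest⟩ := List.cons_eq_cons.mp hd
    have hci : c = cycles.getD i [] := by
      rw [List.getD_eq_getElem _ _ hilt]; exact hc
    rw [PySem.List.enumerate_cons]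
    simp only [List.foldl_cons]
    have hB : ∀ v j, pvBrel cycles i v j → j < (i : Int) := by
      rintro v j ⟨k, _, hk, hj, _⟩; omega
    have hstep := pvFoldC_inv (i := (i : Int)) (B := pvBrel cycles i) (R := pvRrel cycles i) c hB [] st h
    simp only [List.nil_append] at hstep
    -- transition from invariant at i with seen = c to invariant at i+1 with seen = []
    have htrans : pvInv ((i + 1 : Nat) : Int) (pvBrel cycles (i + 1)) (pvRrel cycles (i + 1)) []
        (c.foldl (pvStepV (i : Int)) st) := by
      obtain ⟨h1, h2, h3, h4⟩ := hstep
      refine ⟨fun v j => ?_, fun v j hj => ?_, by simp, fun p => ?_⟩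
      · rw [h1 v j]
        simp only [List.not_mem_nil, and_false, or_false]
        constructor
        · rintro (⟨k, hk1, hk2, hj, hv⟩ | ⟨hj, hv⟩)
          · exact ⟨k, hk1, by omega, hj, hv⟩
          · exact ⟨i, hilt, by omega, hj, hci ▸ hv⟩
        · rintro ⟨k, hk1, hk2, hj, hv⟩
          by_cases hki : k = i
          · subst hki
            exact Or.inr ⟨hj, hci ▸ hv⟩
          · exact Or.inl ⟨k, hk1, by omega, hj, hv⟩
      · have := h2 v j hj
        push_cast
        omega
      · rw [h4 p]
        simp only [List.not_mem_nil, false_and, exists_false, or_false]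
        constructor
        · rintro (⟨v, a, b, hab, hb1, hb2, hp, hva, hvb⟩ | ⟨v, hvc, ⟨k, hk1, hk2, hp1, hvk⟩, hp2⟩)
          · exact ⟨v, a, b, hab, hb1, by omega, hp, hva, hvb⟩
          · refine ⟨v, k, i, by omega, hilt, by omega, ?_, hvk, hci ▸ hvc⟩
            obtain ⟨pa, pb⟩ := p
            simp only [Prod.mk.injEq] at hp1 hp2 ⊢
            exact ⟨hp1, hp2⟩
        · rintro ⟨v, a, b, hab, hb1, hb2, hp, hva, hvb⟩
          by_cases hbi : b = i
          · subst hbi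
            refine Or.inr ⟨v, hci ▸ hvb, ⟨a, by omega, by omega, by rw [hp], hva⟩, by rw [hp]⟩
          · exact Or.inl ⟨v, a, b, hab, hb1, by omega, hp, hva, hvb⟩
    have := ih (i + 1) (c.foldl (pvStepV (i : Int)) st) hrest (by omega) htrans
    simpa [Nat.cast_add, Nat.cast_one] using this

-- characterization of the intersecting-pair set computed by port B
theorem pvInter_char (cycles : List (List Int)) (p : Int × Int) :
    p ∈ ((PySem.List.enumerate cycles 0).foldl (fun st ic => ic.2.foldl (pvStepV ic.1) st)
        ((PySem.Dict.empty : PySem.Dict Int (List Int)), (PySem.Set.empty : PySem.Set (Int × Int)))).2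
      ↔ pvRrel cycles cycles.length p := by
  have h0 : pvInv (0 : Int) (pvBrel cycles 0) (pvRrel cycles 0) []
      ((PySem.Dict.empty : PySem.Dict Int (List Int)), (PySem.Set.empty : PySem.Set (Int × Int))) := by
    refine ⟨fun v j => ?_, fun v j hj => ?_, by simp, fun p => ?_⟩
    · simp only [PySem.Dict.getD_empty, List.not_mem_nil, List.not_mem_nil, and_false, or_false,
        false_iff, pvBrel]
      rintro ⟨k, _, hk, _, _⟩; omega
    · simp [PySem.Dict.getD_empty] at hj
    · simp only [PySem.Set.empty, List.not_mem_nil, false_and, exists_false,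
        or_false, false_iff, pvRrel]
      rintro ⟨v, a, b, _, _, hb, _, _⟩; omega
  have hinv := pvOuter_inv cycles cycles 0 _ (by simp) (by omega) h0
  rw [Nat.cast_zero] at hinv
  obtain ⟨_, _, _, h4⟩ := hinv
  rw [h4 p]
  simp


-- the intersecting-pair set computed by port B (proof-side name)
def pvInterSet (cycles : List (List Int)) : PySem.Set (Int × Int) :=
  ((PySem.List.enumerate cycles 0).foldl (fun st ic => ic.2.foldl (pvStepV ic.1) st)
      ((PySem.Dict.empty : PySem.Dict Int (List Int)), (PySem.Set.empty : PySem.Set (Int × Int)))).2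

theorem pvMemInterSet (cycles : List (List Int)) (a b : Int)
    (ha0 : 0 ≤ a) (hab : a < b) (hb : b < (cycles.length : Int)) :
    ((a, b) ∈ pvInterSet cycles ↔
      ∃ v, v ∈ cycles.getD a.toNat [] ∧ v ∈ cycles.getD b.toNat []) := by
  rw [pvInterSet, pvInter_char cycles (a, b)]
  constructor
  · rintro ⟨v, a', b', hab', hb', _, hp, hva, hvb⟩
    obtain ⟨hpa, hpb⟩ := Prod.mk.injEq .. ▸ hp
    refine ⟨v, ?_, ?_⟩
    · rw [show a.toNat = a' by omega]; exact hva
    · rw [show b.toNat = b' by omega]; exact hvb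
  · rintro ⟨v, hva, hvb⟩
    refine ⟨v, a.toNat, b.toNat, by omega, by omega, by omega, ?_, hva, hvb⟩
    simp only [Prod.mk.injEq]
    omega

theorem pvDisjoint_iff (ca cb : List Int) :
    PySem.Set.inter (PySem.Set.ofList ca) (PySem.Set.ofList cb) = [] ↔
      ¬ ∃ v, v ∈ ca ∧ v ∈ cb := by
  rw [List.eq_nil_iff_forall_not_mem]
  constructor
  · rintro h ⟨v, hva, hvb⟩
    exact h v ((PySem.Set.mem_inter _ _ _).2 ⟨(PySem.Set.mem_ofList _ _).2 hva, (PySem.Set.mem_ofList _ _).2 hvb⟩)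
  · intro h v hv
    obtain ⟨h1, h2⟩ := (PySem.Set.mem_inter _ _ _).1 hv
    exact h ⟨v, (PySem.Set.mem_ofList _ _).1 h1, (PySem.Set.mem_ofList _ _).1 h2⟩

-- ===== VERDICT (by name: the statement is the Claim_ definition above) =====
theorem count_vd_pairs_by_type_spec : Claim_equal_count_vd_pairs_by_type := by
  intro cycles _
  unfold Spec_count_vd_pairs_by_type count_vd_pairs_by_type count_vd_pairs_by_type_alt
  dsimp only
  refine congrArg (fun (d : PySem.Dict (Int × Int) Int) => d.items.map _) ?_
  apply PySem.List.foldl_congr_mem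
  intro d a hamem
  apply PySem.List.foldl_congr_mem
  intro d' b hbmem
  obtain ⟨ha0, ha⟩ := PySem.List.mem_pyRange_one.1 hamem
  obtain ⟨hab, hb⟩ := PySem.List.mem_pyRange_one.1 hbmem
  have haN : a.toNat < cycles.length := by omega
  have hbN : b.toNat < cycles.length := by omega
  have hga : PySem.List.pyGetD (cycles.map (fun c => PySem.Set.ofList c)) a [] =
      PySem.Set.ofList (cycles[a.toNat]) := by
    rw [PySem.List.pyGetD_eq_getElem _ _ ha0 (by simpa using ha), List.getElem_map]
  have hgb : PySem.List.pyGetD (cycles.map (fun c => PySem.Set.ofList c)) b [] =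
      PySem.Set.ofList (cycles[b.toNat]) := by
    rw [PySem.List.pyGetD_eq_getElem _ _ (by omega) (by simpa using hb), List.getElem_map]
  have hca : PySem.List.pyGetD cycles a [] = cycles[a.toNat] :=
    PySem.List.pyGetD_eq_getElem _ _ ha0 (by simpa using ha)
  have hcb : PySem.List.pyGetD cycles b [] = cycles[b.toNat] :=
    PySem.List.pyGetD_eq_getElem _ _ (by omega) (by simpa using hb)
  have hla : PySem.List.pyGetD (cycles.map (fun c => ((c.length : Int)))) a 0 =
      ((cycles[a.toNat]).length : Int) := by
    rw [PySem.List.pyGetD_eq_getElem _ _ ha0 (by simpa using ha), List.getElem_map]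
  have hlb : PySem.List.pyGetD (cycles.map (fun c => ((c.length : Int)))) b 0 =
      ((cycles[b.toNat]).length : Int) := by
    rw [PySem.List.pyGetD_eq_getElem _ _ (by omega) (by simpa using hb), List.getElem_map]
  have hmem : ((a, b) ∈ pvInterSet cycles ↔
      ∃ v, v ∈ cycles[a.toNat] ∧ v ∈ cycles[b.toNat]) := by
    rw [pvMemInterSet cycles a b ha0 hab (by simpa using hb),
      List.getD_eq_getElem _ _ haN, List.getD_eq_getElem _ _ hbN]
  have hcond : (PySem.Set.inter (PySem.List.pyGetD (cycles.map (fun c => PySem.Set.ofList c)) a [])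
      (PySem.List.pyGetD (cycles.map (fun c => PySem.Set.ofList c)) b []) = []) ↔
      ¬ ((a, b) ∈ pvInterSet cycles) := by
    rw [hga, hgb, pvDisjoint_iff, hmem]
  show (if _ then _ else d') = (if (a, b) ∈ pvInterSet cycles then d' else _)
  by_cases hc : (a, b) ∈ pvInterSet cycles
  · rw [if_neg (by rw [hcond]; exact not_not_intro hc), if_pos hc]
  · rw [if_pos (hcond.2 hc), if_neg hc]
    rw [hca, hcb, hla, hlb]
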